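-- pv_equiv track=rewrite | github.com/n4feng/LeetCodeSolution | compareVersion165.py | trimLeadingZero
-- ===== SOURCE A (Python) =====
-- from typing import List
--
-- def trimLeadingZero(version: str, p: int) ->  List[int]:
--     if p >= len(version):
--         return 0,p
--     start = p
--     #trim leading 0
--     while p < len(version) and version[p] == '0':
--         start+=1
--         p+=1
--     while p < len(version) and version[p] != '.':
--         p+=1
--     if start == p:
--         return 0,p+1
--     return int(version[start:p]), p+1
-- ===== SOURCE B (Python) =====
-- def trimLeadingZero(version: str, p: int):
--     # single fused pass: one loop with a skipping-flag state machine that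
--     # accumulates the kept characters, instead of A's two staged index loops + slice
--     if p >= len(version):
--         return 0, p
--     i = p
--     skipping = True
--     kept = []
--     while i < len(version) and version[i] != '.':
--         c = version[i]
--         if skipping and c == '0':
--             pass
--         else:
--             skipping = False
--             kept.append(c)
--         i += 1
--     if not kept:
--         return 0, i + 1
--     return int(''.join(kept)), i + 1
-- ===== Notes on version B (the rewrite author's own statement) =====
-- stated objective: alternative
-- what changed: Replaces A's two staged index loops (skip zeros advancing start/p, then scan to the dot, then slice and compare indices) by one fused single pass: a state machine with a skipping flag that accumulates the kept characters into a list and branches on that accumulator's emptiness.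
-- outside the precondition, e.g. on trimLeadingZero('12', -2): A returns (12, 3), B returns (1212, 3); on trimLeadingZero('0a', 1): A raises ValueError, B raises ValueError
import Mathlib
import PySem

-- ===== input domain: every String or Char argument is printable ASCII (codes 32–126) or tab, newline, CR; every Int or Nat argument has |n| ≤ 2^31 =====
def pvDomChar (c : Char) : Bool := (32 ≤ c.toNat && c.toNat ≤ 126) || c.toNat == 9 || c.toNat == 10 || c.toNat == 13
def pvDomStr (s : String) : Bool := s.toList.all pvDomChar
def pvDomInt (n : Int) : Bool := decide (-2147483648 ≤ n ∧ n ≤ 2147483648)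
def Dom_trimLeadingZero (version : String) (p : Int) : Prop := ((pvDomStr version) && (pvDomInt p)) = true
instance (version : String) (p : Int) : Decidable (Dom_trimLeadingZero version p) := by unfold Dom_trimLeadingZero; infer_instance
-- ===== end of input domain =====

-- B replaces A's two staged index loops (skip zeros, then scan to the dot, then slice) by one
-- fused single pass: a skipping-flag state machine accumulating the kept characters (alternative).
-- Equality is proved on Pre_ (p ≥ 0, and where int() is reached it succeeds).

-- ===== PORT A =====
def pvLoopZeros (cs : List Char) (start p : Int) : Int × Int :=
  if h : p < (cs.length : Int) ∧ PySem.List.pyGet? cs p = some '0' then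
    pvLoopZeros cs (start + 1) (p + 1)
  else (start, p)
termination_by (cs.length - p).toNat
decreasing_by omega

def pvLoopDot (cs : List Char) (p : Int) : Int :=
  if h : p < (cs.length : Int) ∧ PySem.List.pyGet? cs p ≠ some '.' then
    pvLoopDot cs (p + 1)
  else p
termination_by (cs.length - p).toNat
decreasing_by omega

def trimLeadingZero (version : String) (p : Int) : Int × Int :=
  let cs := version.toList
  if p ≥ (cs.length : Int) then (0, p)
  else
    let sp := pvLoopZeros cs p p
    let p2 := pvLoopDot cs sp.2
    if sp.1 = p2 then (0, p2 + 1)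
    else
      match PySem.Int.ofChars? (PySem.List.slice cs (some sp.1) (some p2)) with
      | some v => (v, p2 + 1)
      | none => (0, 0)  -- int() raises ValueError here; excluded by Pre_

-- ===== PORT B =====
-- the fused while-loop of Source B, as structural recursion over its state (i, skipping, kept)
def pvScan (cs : List Char) (i : Int) (skipping : Bool) (kept : List Char) : Int × Int :=
  if h : i < (cs.length : Int) ∧ PySem.List.pyGet? cs i ≠ some '.' then
    -- h used by decreasing_by
    if skipping = true ∧ PySem.List.pyGet? cs i = some '0' then
      pvScan cs (i + 1) skipping kept
    else
      pvScan cs (i + 1) false (kept ++ (PySem.List.pyGet? cs i).toList)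
  else
    if kept = [] then (0, i + 1)
    else
      match PySem.Int.ofChars? kept with
      | some v => (v, i + 1)
      | none => (0, 0)  -- int() raises ValueError here; excluded by Pre_
termination_by (cs.length - i).toNat
decreasing_by all_goals omega

def trimLeadingZero_alt (version : String) (p : Int) : Int × Int :=
  let cs := version.toList
  if p ≥ (cs.length : Int) then (0, p)
  else pvScan cs p true []

-- ===== PRECONDITION & SPEC =====
-- Pre_ excludes (a) negative p, where Python's negative-index wraparound gives A and B accidental,
-- implementation-dependent values (or an IndexError), and (b) inputs whose zero-stripped segment
-- is non-empty but not parseable by int(), where A (and B) raise ValueError.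
def Pre_trimLeadingZero (version : String) (p : Int) : Prop :=
  0 ≤ p ∧
  (((version.toList.drop p.toNat).takeWhile (fun c => !(c == '.'))).dropWhile (· == '0') = [] ∨
   (PySem.Int.ofChars? (((version.toList.drop p.toNat).takeWhile (fun c => !(c == '.'))).dropWhile (· == '0'))).isSome = true)
instance (version : String) (p : Int) : Decidable (Pre_trimLeadingZero version p) := by
  unfold Pre_trimLeadingZero; infer_instance

def pvWitness_trimLeadingZero : String × Int := ("10.007", 3)

def Spec_trimLeadingZero (version : String) (p : Int) (out : Int × Int) : Prop := out = trimLeadingZero_alt version p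
instance (version : String) (p : Int) (out : Int × Int) : Decidable (Spec_trimLeadingZero version p out) := by unfold Spec_trimLeadingZero; infer_instance

-- ===== CLAIM (what is proved, stated in full; the proofs are below) =====
def Claim_equal_trimLeadingZero : Prop := ∀ (version : String) (p : Int), Dom_trimLeadingZero version p → Pre_trimLeadingZero version p → Spec_trimLeadingZero version p (trimLeadingZero version p)

-- ===== LEMMAS AND PROOFS =====

def pvFinish (kept : List Char) (e : Int) : Int × Int :=
  if kept = [] then (0, e)
  else
    match PySem.Int.ofChars? kept with
    | some v => (v, e)
    | none => (0, 0)

theorem pvLoopZeros_eq (cs : List Char) (j : Nat) (a : Int) :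
    pvLoopZeros cs a (j : Int) =
      (a + (((cs.drop j).takeWhile (· == '0')).length : Int),
       (j : Int) + (((cs.drop j).takeWhile (· == '0')).length : Int)) := by
  rw [pvLoopZeros]
  by_cases hj : j < cs.length
  · have hdrop := List.drop_eq_getElem_cons hj
    by_cases hc : cs[j] = '0'
    · have hget : PySem.List.pyGet? cs (j : Int) = some '0' := by
        simp [List.getElem?_eq_getElem hj, hc]
      rw [dif_pos ⟨by exact_mod_cast hj, hget⟩]
      have hrec := pvLoopZeros_eq cs (j + 1) (a + 1)
      rw [show (j : Int) + 1 = ((j + 1 : Nat) : Int) from by push_cast; ring, hrec, hdrop,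
        List.takeWhile_cons]
      simp [hc, Prod.ext_iff]
      constructor <;> ring
    · have hget : ¬ (PySem.List.pyGet? cs (j : Int) = some '0') := by
        simp [List.getElem?_eq_getElem hj, hc]
      rw [dif_neg (by intro h; exact hget h.2)]
      rw [hdrop]
      simp [hc]
  · rw [dif_neg (by intro h; exact hj (by exact_mod_cast h.1))]
    rw [List.drop_eq_nil_of_le (by omega)]
    simp
termination_by cs.length - j
decreasing_by omega

theorem pvLoopDot_eq (cs : List Char) (j : Nat) :
    pvLoopDot cs (j : Int) =
      (j : Int) + (((cs.drop j).takeWhile (fun c => !(c == '.'))).length : Int) := by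
  rw [pvLoopDot]
  by_cases hj : j < cs.length
  · have hdrop := List.drop_eq_getElem_cons hj
    by_cases hc : cs[j] = '.'
    · have hget : PySem.List.pyGet? cs (j : Int) = some '.' := by
        simp [List.getElem?_eq_getElem hj, hc]
      rw [dif_neg (by intro h; exact h.2 hget)]
      rw [hdrop]
      simp [hc]
    · have hget : ¬ (PySem.List.pyGet? cs (j : Int) = some '.') := by
        simp [List.getElem?_eq_getElem hj, hc]
      rw [dif_pos ⟨by exact_mod_cast hj, hget⟩]
      have hrec := pvLoopDot_eq cs (j + 1)
      rw [show (j : Int) + 1 = ((j + 1 : Nat) : Int) from by push_cast; ring, hrec, hdrop,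
        List.takeWhile_cons]
      simp [hc]
      ring
  · rw [dif_neg (by intro h; exact hj (by exact_mod_cast h.1))]
    rw [List.drop_eq_nil_of_le (by omega)]
    simp
termination_by cs.length - j
decreasing_by omega

theorem pvDrop_takeWhile_length {α : Type} (q : α → Bool) (l : List α) :
    l.drop (l.takeWhile q).length = l.dropWhile q := by
  induction l with
  | nil => simp
  | cons c tl ih =>
      by_cases hc : q c
      · simp [hc, ih]
      · simp [hc]

theorem pvScanFalse_eq (cs : List Char) (j : Nat) (kept : List Char) :
    pvScan cs (j : Int) false kept =
      pvFinish (kept ++ (cs.drop j).takeWhile (fun c => !(c == '.')))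
        ((j : Int) + (((cs.drop j).takeWhile (fun c => !(c == '.'))).length : Int) + 1) := by
  rw [pvScan]
  by_cases hj : j < cs.length
  · have hdrop := List.drop_eq_getElem_cons hj
    by_cases hc : cs[j] = '.'
    · have hget : PySem.List.pyGet? cs (j : Int) = some '.' := by
        simp [List.getElem?_eq_getElem hj, hc]
      rw [dif_neg (by intro h; exact h.2 hget)]
      rw [hdrop, List.takeWhile_cons]
      simp [hc, pvFinish]
    · have hget : PySem.List.pyGet? cs (j : Int) = some cs[j] := by
        simp [List.getElem?_eq_getElem hj]
      rw [dif_pos ⟨by exact_mod_cast hj, by simp [hget, hc]⟩]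
      rw [if_neg (by simp)]
      have hrec := pvScanFalse_eq cs (j + 1) (kept ++ [cs[j]])
      rw [hget, show (j : Int) + 1 = ((j + 1 : Nat) : Int) from by push_cast; ring]
      simp only [Option.toList_some]
      rw [hrec, hdrop, List.takeWhile_cons]
      simp only [if_pos (show (!(cs[j] == '.')) = true by simp [hc]), List.append_assoc,
        List.singleton_append, List.length_cons]
      congr 1
      push_cast; ring
  · rw [dif_neg (by intro h; exact hj (by exact_mod_cast h.1))]
    rw [List.drop_eq_nil_of_le (by omega)]
    simp [pvFinish]
termination_by cs.length - j
decreasing_by omega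

theorem pvScanTrue_eq (cs : List Char) (j : Nat) :
    pvScan cs (j : Int) true [] =
      pvFinish (((cs.drop j).dropWhile (· == '0')).takeWhile (fun c => !(c == '.')))
        ((j : Int) + (((cs.drop j).takeWhile (· == '0')).length : Int)
          + ((((cs.drop j).dropWhile (· == '0')).takeWhile (fun c => !(c == '.'))).length : Int) + 1) := by
  rw [pvScan]
  by_cases hj : j < cs.length
  · have hdrop := List.drop_eq_getElem_cons hj
    by_cases hc0 : cs[j] = '0'
    · have hget : PySem.List.pyGet? cs (j : Int) = some '0' := by
        simp [List.getElem?_eq_getElem hj, hc0]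
      rw [dif_pos ⟨by exact_mod_cast hj, by simp [hget]⟩]
      rw [if_pos ⟨rfl, hget⟩]
      have hrec := pvScanTrue_eq cs (j + 1)
      rw [show (j : Int) + 1 = ((j + 1 : Nat) : Int) from by push_cast; ring, hrec, hdrop,
        List.takeWhile_cons, List.dropWhile_cons]
      simp only [if_pos (show (cs[j] == '0') = true by simp [hc0]), List.length_cons]
      congr 1
      push_cast; ring
    · by_cases hc : cs[j] = '.'
      · have hget : PySem.List.pyGet? cs (j : Int) = some '.' := by
          simp [List.getElem?_eq_getElem hj, hc]
        rw [dif_neg (by intro h; exact h.2 hget)]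
        rw [hdrop, List.takeWhile_cons, List.dropWhile_cons]
        simp [hc, pvFinish]
      · have hget : PySem.List.pyGet? cs (j : Int) = some cs[j] := by
          simp [List.getElem?_eq_getElem hj]
        rw [dif_pos ⟨by exact_mod_cast hj, by simp [hget, hc]⟩]
        rw [if_neg (by simp [hget, hc0])]
        rw [hget, show (j : Int) + 1 = ((j + 1 : Nat) : Int) from by push_cast; ring]
        simp only [Option.toList_some, List.nil_append]
        rw [pvScanFalse_eq cs (j + 1) [cs[j]], hdrop, List.takeWhile_cons, List.dropWhile_cons]
        simp only [List.takeWhile_cons, if_pos (show (!(cs[j] == '.')) = true by simp [hc]),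
          if_neg (show ¬ ((cs[j] == '0') = true) by simp [hc0]),
          List.singleton_append, List.length_cons, List.length_nil]
        congr 1
        push_cast; ring
  · rw [dif_neg (by intro h; exact hj (by exact_mod_cast h.1))]
    rw [List.drop_eq_nil_of_le (by omega)]
    simp [pvFinish]
termination_by cs.length - j
decreasing_by omega

theorem pv_main (version : String) (p : Int) (hp0 : 0 ≤ p) :
    trimLeadingZero version p = trimLeadingZero_alt version p := by
  simp only [trimLeadingZero, trimLeadingZero_alt]
  by_cases hlen : p ≥ (version.toList.length : Int)
  · rw [if_pos hlen, if_pos hlen]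
  · obtain ⟨j, rfl⟩ : ∃ j : Nat, p = (j : Int) := ⟨p.toNat, by omega⟩
    set cs := version.toList with hcs
    rw [if_neg hlen, if_neg hlen]
    rw [pvLoopZeros_eq, pvScanTrue_eq]
    set t := cs.drop j with ht
    set z := t.takeWhile (· == '0') with hzdef
    set k := z.length with hkdef
    have hcast : (j : Int) + (k : Int) = ((j + k : Nat) : Int) := by push_cast; ring
    rw [hcast, pvLoopDot_eq cs (j + k)]
    simp only []
    have hdw : cs.drop (j + k) = t.dropWhile (· == '0') := by
      rw [← pvDrop_takeWhile_length (· == '0') t, ht, List.drop_drop]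
    rw [hdw]
    set w := (t.dropWhile (· == '0')).takeWhile (fun c => !(c == '.')) with hwdef
    by_cases hwnil : w = []
    · rw [if_pos (by simp [hwnil])]
      simp [hwnil, pvFinish]
    · have hwlen : 0 < w.length := List.length_pos_iff.mpr hwnil
      have hcond : ¬ (((j + k : Nat) : Int) = ((j + k : Nat) : Int) + (w.length : Int)) := by
        intro h
        exact hwnil (List.length_eq_zero_iff.mp (by omega))
      rw [if_neg hcond]
      have hsliceA : PySem.List.slice cs (some ((j + k : Nat) : Int))
          (some (((j + k : Nat) : Int) + (w.length : Int))) = w := by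
        rw [PySem.List.slice_natCast_add, hdw]
        exact (List.prefix_iff_eq_take.mp (List.takeWhile_prefix _)).symm
      rw [hsliceA]
      have he : ((j + k : Nat) : Int) + (w.length : Int) + 1
          = (j : Int) + (k : Int) + (w.length : Int) + 1 := by push_cast; ring
      rw [pvFinish, if_neg hwnil, he]

-- ===== VERDICT (by name: the statement is the Claim_ definition above) =====
theorem trimLeadingZero_spec : Claim_equal_trimLeadingZero := by
  intro version p _ hpre
  unfold Spec_trimLeadingZero
  exact pv_main version p hpre.1
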